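/- GENERATED by tools/from_farm_form.py from prooffarm-gif/accepted/DGifDecompressLine.12/Proof.lean (a worked proof of the farm's unit `DGifDecompressLine.12`,
   accepted by the verdict) — do not edit. -/
import Gif.Spec.Units.DGifDecompressLine_12
import Gif.Spec.AllSegs
import Gif.Spec.Proved.DGifDecompressLine_12_Lemmas

open X86 X86.User Asan ProgX.Base ProgX.Base.Spec Gif.Spec

namespace Gif.Spec.DGifDecompressLine_12

end Gif.Spec.DGifDecompressLine_12

/-- Segment 12 of `DGifDecompressLine` (106EDEH … 106F43H; l.970-972): THE SECOND POP LOOP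
`while (StackPtr != 0 && i < LineLen) Line[i++] = Stack[--StackPtr];`. The assertion `Pop` at the head 106F12H is the loop
invariant; one round is `dl12_round` (Lemmas.lean); the rounds are chained by a strong induction on the measure StackPtr
(`rbx`) until the exit `Upd` at 106FEAH. -/
theorem Gif.Spec.Proved.DGifDecompressLine_12_ok : Gif.Spec.DGifDecompressLine_12.Statement := by
  intro Lay hLay μ hμ u₀ hcode h_load1 h_store1 H rest frames F R n m e ret
  -- THE LOOP: from the head (106F12H, l.970) with `StackPtr = k`
  have fromPop : ∀ k v, (v.reg .rbx).toNat = k →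
      DGifDecompressLine.Pop Gif.L.DGifDecompressLine.at_106f12 m H rest frames F R n u₀ e ret v →
      ReachVia Lay μ WayInv v (DGifDecompressLine.Upd Gif.L.DGifDecompressLine.at_106fea m H rest frames F R n u₀ e ret) := by
    intro k
    induction k using Nat.strongRecOn with
    | _ k ih =>
      intro v hk hat
      -- one round
      refine (Gif.Spec.DGifDecompressLine_12.dl12_round Lay hLay μ hμ u₀ hcode h_load1 h_store1
        H rest frames F R n m e ret v hat).trans ?_
      intro w hw
      rcases hw with hw | ⟨hw, hlt⟩
      · -- the exit 106FEAH (l.974): `Upd`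
        exact ReachVia.done hw
      · -- the head again, StackPtr smaller
        exact ih (w.reg .rbx).toNat (by omega) w rfl hw
  intro v hat
  exact fromPop (v.reg .rbx).toNat v rfl hat
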